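-- pv_equiv track=rewrite | github.com/DetegiCE/baekjoon-ps | 6000s/6872.py | f
-- ===== SOURCE A (Python) =====
-- def f(a):
--     b = 2
--     i = 2
--     while i * i <= a:
--         if i * i == a:
--             b += 1
--         elif a % i == 0:
--             b += 2
--         if b > 4:
--             return False
--         i += 1
--     if b == 4: return True
--     else: return False
-- ===== SOURCE B (Python) =====
-- def f(a):
--     # a number has exactly four divisors iff it is p**3 or p*q for distinct primes p < q:
--     # find the smallest divisor p >= 2 with p*p <= a, then classify the cofactor a // p.
--     i = 2
--     while i * i <= a:
--         if a % i == 0: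
--             q = a // i
--             if q == i * i:      # a == p**3
--                 return True
--             if q == i:          # a == p**2: three divisors
--                 return False
--             j = 2               # a == p*q with p < q: four divisors iff q is prime
--             while j * j <= q:
--                 if q % j == 0:
--                     return False
--                 j += 1
--             return True
--         i += 1
--     return False                # prime, 1, 0 or negative: never four divisors
-- ===== Notes on version B (the rewrite author's own statement) =====
-- stated objective: alternative
-- what changed: B replaces A's full sqrt-scan divisor count with the number-theoretic characterisation 'exactly four divisors iff a is a prime cubed or a product of two distinct primes': it stops at the smallest divisor p and classifies the cofactor a//p (cube test, square test, or a primality trial division of the cofactor).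
import Mathlib
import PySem

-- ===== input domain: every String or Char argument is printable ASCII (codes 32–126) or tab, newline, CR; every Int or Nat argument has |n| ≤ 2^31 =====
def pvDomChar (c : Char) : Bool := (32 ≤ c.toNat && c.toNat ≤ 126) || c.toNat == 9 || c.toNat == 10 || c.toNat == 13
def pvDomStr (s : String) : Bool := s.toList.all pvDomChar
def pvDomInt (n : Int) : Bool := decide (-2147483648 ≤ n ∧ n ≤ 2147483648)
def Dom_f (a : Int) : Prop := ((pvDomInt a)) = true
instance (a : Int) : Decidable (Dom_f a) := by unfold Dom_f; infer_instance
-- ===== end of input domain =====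

-- B replaces A's sqrt-scan divisor count by the characterisation exactly-four-divisors ↔ a = p·p·p or a = p·q
-- (distinct primes): stop at the smallest divisor and classify the cofactor (objective: alternative).

-- termination helper for all three loops: i*i ≤ a forces i ≤ a
theorem pvStep_le {a i : Int} (h : i * i ≤ a) : i ≤ a := by
  nlinarith [mul_self_nonneg i, mul_self_nonneg (i - 1)]

-- ===== PORT A =====
def loopA (a b i : Int) : Bool :=
  if h : i * i ≤ a then
    let b' := if i * i == a then b + 1
              else if PySem.Int.mod a i == 0 then b + 2 else b
    if b' > 4 then false else loopA a b' (i + 1)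
  else b == 4
termination_by (a + 1 - i).toNat
decreasing_by
  have := pvStep_le h
  omega

def f (a : Int) : Bool := loopA a 2 2

-- ===== PORT B =====
-- inner while of Source B: trial division of q by j, j, j+1, …
def isPrimeLoop (q j : Int) : Bool :=
  if h : j * j ≤ q then
    if PySem.Int.mod q j == 0 then false else isPrimeLoop q (j + 1)
  else true
termination_by (q + 1 - j).toNat
decreasing_by
  have := pvStep_le h
  omega

-- outer while of Source B
def loopB (a i : Int) : Bool :=
  if h : i * i ≤ a then
    if PySem.Int.mod a i == 0 then
      let q := PySem.Int.floordiv a i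
      if q == i * i then true
      else if q == i then false
      else isPrimeLoop q 2
    else loopB a (i + 1)
  else false
termination_by (a + 1 - i).toNat
decreasing_by
  have := pvStep_le h
  omega

def f_alt (a : Int) : Bool := loopB a 2

-- ===== PRECONDITION & SPEC =====
def Spec_f (a : Int) (out : Bool) : Prop := out = f_alt a
instance (a : Int) (out : Bool) : Decidable (Spec_f a out) := by unfold Spec_f; infer_instance

-- ===== CLAIM (what is proved, stated in full; the proofs are below) =====
def Claim_equal_f : Prop := ∀ (a : Int), Dom_f a → Spec_f a (f a)

-- ===== LEMMAS AND PROOFS =====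

-- A's loop when no divisor remains in the scan window: b is returned unchanged
theorem loopA_clean (a b i : Int) (hi : 2 ≤ i)
    (h : ∀ j : Int, i ≤ j → j * j ≤ a → ¬ j ∣ a) : loopA a b i = (b == 4) := by
  rw [loopA]
  split
  next hle =>
    have hnd : ¬ i ∣ a := h i le_rfl hle
    have hne : (i * i == a) = false := by
      refine beq_eq_false_iff_ne.mpr (fun he => hnd ⟨i, he.symm⟩)
    have hm : (PySem.Int.mod a i == 0) = false := by
      refine beq_eq_false_iff_ne.mpr (fun hm => hnd ((PySem.Int.mod_eq_zero_iff_dvd a i).mp hm))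
    simp only [hne, hm, Bool.false_eq_true, if_false]
    split
    next hb4 =>
      exact (beq_eq_false_iff_ne.mpr (by omega : b ≠ 4)).symm
    next =>
      exact loopA_clean a b (i + 1) (by omega) (fun j hj hja => h j (by omega) hja)
  next => rfl
termination_by (a + 1 - i).toNat
decreasing_by
  have hle' : i * i ≤ a := by assumption
  have := pvStep_le hle'
  omega

-- A's loop once b ≥ 4 and a further divisor exists in the window: returns false
theorem loopA_dead (a b i : Int) (hi : 2 ≤ i) (hb : 4 ≤ b)
    (h : ∃ j : Int, i ≤ j ∧ j * j ≤ a ∧ j ∣ a) : loopA a b i = false := by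
  obtain ⟨j, hij, hja, hjd⟩ := h
  have hii : i * i ≤ a := le_trans (mul_le_mul hij hij (by omega) (by omega)) hja
  rw [loopA]
  rw [dif_pos hii]
  by_cases hdvd : i ∣ a
  · have hm : (PySem.Int.mod a i == 0) = true :=
      beq_iff_eq.mpr ((PySem.Int.mod_eq_zero_iff_dvd a i).mpr hdvd)
    by_cases hsq : i * i = a
    · have heq : (i * i == a) = true := beq_iff_eq.mpr hsq
      simp only [heq, if_true]
      rw [if_pos (by omega)]
    · have hne : (i * i == a) = false := beq_eq_false_iff_ne.mpr hsq
      simp only [hne, hm, Bool.false_eq_true, if_false, if_true]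
      rw [if_pos (by omega)]
  · have hne : (i * i == a) = false := by
      refine beq_eq_false_iff_ne.mpr (fun he => hdvd ⟨i, he.symm⟩)
    have hm : (PySem.Int.mod a i == 0) = false := by
      refine beq_eq_false_iff_ne.mpr (fun hm => hdvd ((PySem.Int.mod_eq_zero_iff_dvd a i).mp hm))
    simp only [hne, hm, Bool.false_eq_true, if_false]
    split
    · rfl
    · have hij' : i + 1 ≤ j := by
        rcases eq_or_lt_of_le hij with he | hl
        · exact absurd (he ▸ hjd) hdvd
        · omega
      exact loopA_dead a b (i + 1) (by omega) hb ⟨j, hij', hja, hjd⟩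
termination_by (a + 1 - i).toNat
decreasing_by
  have := pvStep_le hii
  omega

theorem isPrimeLoop_clean (q j : Int) (h : ∀ k : Int, j ≤ k → k * k ≤ q → ¬ k ∣ q) :
    isPrimeLoop q j = true := by
  rw [isPrimeLoop]
  split
  next hle =>
    have hnd : ¬ j ∣ q := h j le_rfl hle
    have hm : (PySem.Int.mod q j == 0) = false := by
      refine beq_eq_false_iff_ne.mpr (fun hm => hnd ((PySem.Int.mod_eq_zero_iff_dvd q j).mp hm))
    simp only [hm, Bool.false_eq_true, if_false]
    exact isPrimeLoop_clean q (j + 1) (fun k hk hkq => h k (by omega) hkq)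
  next => rfl
termination_by (q + 1 - j).toNat
decreasing_by
  have hle' : j * j ≤ q := by assumption
  have := pvStep_le hle'
  omega

theorem isPrimeLoop_found (q j : Int) (hj : 2 ≤ j)
    (h : ∃ k : Int, j ≤ k ∧ k * k ≤ q ∧ k ∣ q) : isPrimeLoop q j = false := by
  obtain ⟨k, hjk, hkq, hkd⟩ := h
  have hjj : j * j ≤ q := le_trans (mul_le_mul hjk hjk (by omega) (by omega)) hkq
  rw [isPrimeLoop]
  rw [dif_pos hjj]
  by_cases hdvd : j ∣ q
  · rw [if_pos (beq_iff_eq.mpr ((PySem.Int.mod_eq_zero_iff_dvd q j).mpr hdvd))]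
  · have hm : (PySem.Int.mod q j == 0) = false := by
      refine beq_eq_false_iff_ne.mpr (fun hm => hdvd ((PySem.Int.mod_eq_zero_iff_dvd q j).mp hm))
    simp only [hm, Bool.false_eq_true, if_false]
    have hjk' : j + 1 ≤ k := by
      rcases eq_or_lt_of_le hjk with he | hl
      · exact absurd (he ▸ hkd) hdvd
      · omega
    exact isPrimeLoop_found q (j + 1) (by omega) ⟨k, hjk', hkq, hkd⟩
termination_by (q + 1 - j).toNat
decreasing_by
  have := pvStep_le hjj
  omega

-- core number theory: with p the least divisor ≥ 2 of p*q and p < q,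
-- "no divisor above p up to the square root" ↔ "cofactor is p² or prime"
theorem char4 (P Q : ℕ) (hP : 2 ≤ P) (hPQ : P < Q)
    (hmin : ∀ j : ℕ, 2 ≤ j → j < P → ¬ j ∣ P * Q) :
    (∀ j : ℕ, P < j → j * j ≤ P * Q → ¬ j ∣ P * Q) ↔ (Q = P * P ∨ Nat.Prime Q) := by
  have hPp : Nat.Prime P := by
    rw [Nat.prime_def_lt']
    exact ⟨hP, fun m hm hmP hdvd => hmin m hm hmP (Dvd.dvd.mul_right hdvd Q)⟩
  have hQ2 : 2 ≤ Q := by omega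
  constructor
  · intro H
    by_contra hcon
    rw [not_or] at hcon
    obtain ⟨hQsq, hQnp⟩ := hcon
    set u := Q.minFac with hu
    have hup : u.Prime := Nat.minFac_prime (by omega)
    have huQ : u ∣ Q := Nat.minFac_dvd Q
    have hu2 : 2 ≤ u := hup.two_le
    have husq : u * u ≤ Q := by
      have := Nat.minFac_sq_le_self (by omega : 0 < Q) hQnp
      nlinarith [this]
    have huPQ : u ∣ P * Q := Dvd.dvd.mul_left huQ P
    have huge : ¬ u < P := fun hlt => hmin u hu2 hlt huPQ
    rcases lt_or_ge P u with hPu | hPu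
    · exact H u hPu (le_trans husq (Nat.le_mul_of_pos_left Q (by omega))) huPQ
    · have huP : u = P := by omega
      have hPdQ : P ∣ Q := huP ▸ huQ
      obtain ⟨R, hQR⟩ := hPdQ
      have hR2 : 2 ≤ R := by
        rcases Nat.lt_or_ge R 2 with h | h
        · interval_cases R <;> omega
        · exact h
      have hRQ : R ∣ Q := ⟨P, by rw [hQR]; ring⟩
      have hPR : P ≤ R := by
        have hw : Q.minFac ≤ R.minFac :=
          Nat.minFac_le_of_dvd (Nat.minFac_prime (by omega : R ≠ 1)).two_le
            (dvd_trans (Nat.minFac_dvd R) hRQ)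
        have : R.minFac ≤ R := Nat.minFac_le (by omega)
        omega
      have hPRne : P ≠ R := fun he => hQsq (by rw [hQR, ← he])
      have hPRlt : P < R := by omega
      rcases Nat.lt_or_ge (P * P) R with hc | hc
      · exact H (P * P) (by nlinarith) (by nlinarith) ⟨R, by rw [hQR]; ring⟩
      · exact H R hPRlt (by nlinarith) (Dvd.dvd.mul_left hRQ P)
  · rintro (hsq | hQp) j hj hjsq hjd
    · subst hsq
      have hj3 : j ∣ P ^ 3 := by
        have : P * (P * P) = P ^ 3 := by ring
        rwa [this] at hjd
      obtain ⟨k, hk3, hjk⟩ := (Nat.dvd_prime_pow hPp).mp hj3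
      interval_cases k <;> simp_all <;> nlinarith
    · by_cases hPj : P ∣ j
      · obtain ⟨m, hm⟩ := hPj
        have hmQ : m ∣ Q := by
          have : P * m ∣ P * Q := hm ▸ hjd
          exact (mul_dvd_mul_iff_left (by omega : P ≠ 0)).mp this
        rcases (Nat.Prime.eq_one_or_self_of_dvd hQp m hmQ) with h1 | hQm
        · subst h1
          simp at hm
          omega
        · subst hQm
          nlinarith
      · have hco : Nat.Coprime j P :=
          Nat.Coprime.symm ((Nat.Prime.coprime_iff_not_dvd hPp).mpr hPj)
        have hjQ : j ∣ Q := (Nat.Coprime.dvd_of_dvd_mul_left hco) hjd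
        rcases (Nat.Prime.eq_one_or_self_of_dvd hQp j hjQ) with h1 | hQj
        · omega
        · subst hQj
          nlinarith

-- the two scans agree while no divisor has been seen yet
theorem scan (a i : Int) (hi : 2 ≤ i)
    (h : ∀ j : Int, 2 ≤ j → j < i → ¬ j ∣ a) : loopA a 2 i = loopB a i := by
  rw [loopA, loopB]
  by_cases hle : i * i ≤ a
  · rw [dif_pos hle, dif_pos hle]
    by_cases hdvd : i ∣ a
    · -- i is the least divisor ≥ 2 of a in the window
      have hi0 : (0 : Int) < i := by omega
      have ha4 : (4 : Int) ≤ a := le_trans (by nlinarith) hle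
      have hm : (PySem.Int.mod a i == 0) = true :=
        beq_iff_eq.mpr ((PySem.Int.mod_eq_zero_iff_dvd a i).mpr hdvd)
      conv_rhs => rw [if_pos hm]
      have hflo : PySem.Int.floordiv a i = a / i := PySem.Int.floordiv_eq_ediv_of_pos hi0
      have hqi : a / i * i = a := Int.ediv_mul_cancel hdvd
      by_cases hsq : i * i = a
      · -- a = i²: A reaches b = 3 and stops; B sees cofactor = i
        have heq : (i * i == a) = true := beq_iff_eq.mpr hsq
        simp only [heq, if_true]
        rw [if_neg (by omega : ¬ (2 : Int) + 1 > 4)]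
        rw [loopA_clean a (2 + 1) (i + 1) (by omega)
          (fun j hj hja _ => absurd hja (by nlinarith : ¬ j * j ≤ a))]
        rw [show ((2 : Int) + 1 == 4) = false from by decide]
        have hqv : PySem.Int.floordiv a i = i := by
          rw [hflo, ← hsq, Int.mul_ediv_cancel_left i (by omega : i ≠ 0)]
        have h1 : (PySem.Int.floordiv a i == i * i) = false :=
          beq_eq_false_iff_ne.mpr (by rw [hqv]; nlinarith)
        have h2 : (PySem.Int.floordiv a i == i) = true := beq_iff_eq.mpr hqv
        simp only [h1, h2, Bool.false_eq_true, if_false, if_true]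
      · -- i² < a: A reaches b = 4; B classifies the cofactor q = a / i
        have hne : (i * i == a) = false := beq_eq_false_iff_ne.mpr hsq
        simp only [hne, hm, Bool.false_eq_true, if_false, if_true]
        rw [if_neg (by omega : ¬ (2 : Int) + 2 > 4)]
        set q : Int := a / i with hqdef
        have hq : q * i = a := hqi
        have hlt : i * i < a := lt_of_le_of_ne hle hsq
        have hqgt : i < q := by
          by_contra hc
          have hc' : q ≤ i := not_lt.mp hc
          have : q * i ≤ i * i := mul_le_mul_of_nonneg_right hc' (by omega)
          linarith
        -- move to ℕ
        obtain ⟨P, hP⟩ : ∃ P : ℕ, (P : Int) = i := ⟨i.toNat, Int.toNat_of_nonneg (by omega)⟩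
        obtain ⟨Q, hQ⟩ : ∃ Q : ℕ, (Q : Int) = q := ⟨q.toNat, Int.toNat_of_nonneg (by omega)⟩
        have hP2 : 2 ≤ P := by omega
        have hPQlt : P < Q := by omega
        have haPQ : a = ((P * Q : ℕ) : Int) := by push_cast; rw [hP, hQ]; nlinarith [hq]
        have hmin : ∀ j : ℕ, 2 ≤ j → j < P → ¬ j ∣ P * Q := by
          intro j hj2 hjP hjd
          exact h (j : Int) (by exact_mod_cast hj2) (by omega)
            (by rw [haPQ]; exact_mod_cast hjd)
        have bridge : (∀ j : Int, i + 1 ≤ j → j * j ≤ a → ¬ j ∣ a) ↔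
            (∀ j : ℕ, P < j → j * j ≤ P * Q → ¬ j ∣ P * Q) := by
          constructor
          · intro H j hj hjsq hjd
            refine H (j : Int) (by omega) ?_ (by rw [haPQ]; exact_mod_cast hjd)
            rw [haPQ]; exact_mod_cast hjsq
          · intro H j hj hjsq hjd
            obtain ⟨m, rfl⟩ : ∃ m : ℕ, (m : Int) = j := ⟨j.toNat, Int.toNat_of_nonneg (by omega)⟩
            refine H m (by omega) ?_ ?_
            · have h' : ((m * m : ℕ) : Int) ≤ ((P * Q : ℕ) : Int) := by
                rw [← haPQ]; push_cast; exact hjsq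
              exact_mod_cast h'
            · rw [haPQ] at hjd; exact_mod_cast hjd
        have hQ2 : 2 ≤ Q := by omega
        by_cases hEx : ∃ j : Int, i + 1 ≤ j ∧ j * j ≤ a ∧ j ∣ a
        · -- a further divisor exists: both sides are false
          rw [loopA_dead a (2 + 2) (i + 1) (by omega) (by omega) hEx]
          have hnot : ¬ (Q = P * P ∨ Nat.Prime Q) := by
            intro hcase
            obtain ⟨j, hj1, hj2, hj3⟩ := hEx
            exact (bridge.mpr ((char4 P Q hP2 hPQlt hmin).mpr hcase)) j hj1 hj2 hj3
          rw [not_or] at hnot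
          obtain ⟨hq1, hq2⟩ := hnot
          have h1 : (PySem.Int.floordiv a i == i * i) = false := by
            refine beq_eq_false_iff_ne.mpr ?_
            rw [hflo, ← hQ, ← hP]
            intro hc
            exact hq1 (by exact_mod_cast hc)
          have h2 : (PySem.Int.floordiv a i == i) = false :=
            beq_eq_false_iff_ne.mpr (by rw [hflo]; omega)
          simp only [h1, h2, Bool.false_eq_true, if_false]
          rw [hflo]
          refine (isPrimeLoop_found q 2 le_rfl ?_).symm
          -- witness: the least prime factor of the composite Q
          have hup : (Q.minFac).Prime := Nat.minFac_prime (by omega)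
          refine ⟨(Q.minFac : Int), by exact_mod_cast hup.two_le, ?_, ?_⟩
          · have := Nat.minFac_sq_le_self (by omega : 0 < Q) hq2
            rw [← hQ]
            have h' : Q.minFac * Q.minFac ≤ Q := by nlinarith [this]
            exact_mod_cast h'
          · rw [← hQ]; exact_mod_cast Nat.minFac_dvd Q
        · -- no further divisor: A returns true; B's classification also says true
          rw [loopA_clean a (2 + 2) (i + 1) (by omega)
            (fun j hj hja hjd => hEx ⟨j, hj, hja, hjd⟩)]
          rw [show ((2 : Int) + 2 == 4) = true from by decide]
          have hcase : Q = P * P ∨ Nat.Prime Q :=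
            (char4 P Q hP2 hPQlt hmin).mp
              (bridge.mp (fun j hj hja hjd => hEx ⟨j, hj, hja, hjd⟩))
          by_cases hq1 : q = i * i
          · have h1 : (PySem.Int.floordiv a i == i * i) = true :=
              beq_iff_eq.mpr (by rw [hflo]; exact hq1)
            simp only [h1, if_true]
          · have hQp : Nat.Prime Q := by
              rcases hcase with hc | hc
              · exact absurd (by rw [← hQ, ← hP, hc]; push_cast; ring) hq1
              · exact hc
            have h1 : (PySem.Int.floordiv a i == i * i) = false :=
              beq_eq_false_iff_ne.mpr (by rw [hflo]; exact hq1)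
            have h2 : (PySem.Int.floordiv a i == i) = false :=
              beq_eq_false_iff_ne.mpr (by rw [hflo]; omega)
            simp only [h1, h2, Bool.false_eq_true, if_false]
            rw [hflo]
            refine (isPrimeLoop_clean q 2 ?_).symm
            intro k hk2 hksq hkd
            obtain ⟨m, rfl⟩ : ∃ m : ℕ, (m : Int) = k := ⟨k.toNat, Int.toNat_of_nonneg (by omega)⟩
            have hmQ : m ∣ Q := by rw [← hQ] at hkd; exact_mod_cast hkd
            rcases (Nat.Prime.eq_one_or_self_of_dvd hQp m hmQ) with h1' | h1'
            · omega
            · subst h1'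
              rw [← hQ] at hksq
              have : (m : Int) ≤ 1 := by nlinarith
              omega
    · -- i does not divide a: both loops step to i + 1
      have hne : (i * i == a) = false :=
        beq_eq_false_iff_ne.mpr (fun he => hdvd ⟨i, he.symm⟩)
      have hm : (PySem.Int.mod a i == 0) = false :=
        beq_eq_false_iff_ne.mpr (fun hm => hdvd ((PySem.Int.mod_eq_zero_iff_dvd a i).mp hm))
      simp only [hne, hm, Bool.false_eq_true, if_false]
      rw [if_neg (by omega : ¬ (2 : Int) > 4)]
      refine scan a (i + 1) (by omega) ?_
      intro j hj2 hji hjd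
      rcases eq_or_lt_of_le (by omega : j ≤ i) with he | hl
      · exact hdvd (he ▸ hjd)
      · exact h j hj2 (by omega) hjd
  · rw [dif_neg hle, dif_neg hle]
    rfl
termination_by (a + 1 - i).toNat
decreasing_by
  have := pvStep_le hle
  omega

-- ===== VERDICT (by name: the statement is the Claim_ definition above) =====
theorem f_spec : Claim_equal_f := by
  intro a _
  unfold Spec_f f f_alt
  exact scan a 2 le_rfl (by omega)
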